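-- pv_equiv track=rewrite | github.com/ysu96/Algorithm-Python | PYTHON/우아한테크코스 1차/7번.py | solution
-- ===== SOURCE A (Python) =====
-- def rotateClock(curgraph):
--     tmp = [[0] * len(curgraph) for _ in range(len(curgraph[0]))]
--     for i in range(len(curgraph)):
--         for j in range(len(curgraph[0])):
--             tmp[j][i] = curgraph[len(curgraph) - i - 1][j]
--
--     return tmp
--
-- def rotateReverse(curgraph):
--     tmp = [[0] * len(curgraph) for _ in range(len(curgraph[0]))]
--     for i in range(len(curgraph)):
--         for j in range(len(curgraph[0])):
--             tmp[j][i] = curgraph[i][len(curgraph[0])-j-1]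
--
--     return tmp
--
-- def solution(grid, clockwise):
--     answer = []
--     #시계방향
--     if clockwise:
--         l = (len(grid)-1)*2 + 1 #마지막 줄 길이
--         graph = [['-']*l for _ in range(len(grid))]
--
--         #시계방향이면 왼쪽을 '-'로 채우기
--         for i in range(len(grid)):
--             for j in range(len(grid[i])):
--                 graph[i][l-len(grid[i])+j] = grid[i][j]
--
--         temp = rotateClock(graph)
--         answer.append(temp[0][0])
--         for i in range(1, len(temp),2):
--             line = ''
--             for j in range(len(temp[0])):
--
--                 if temp[i+1][j] != '-':
--                     line+=temp[i+1][j]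
--
--                 if temp[i][j] != '-':
--                     line+=temp[i][j]
--             answer.append(line)
--
--     #반시계방향
--     else:
--         l = (len(grid) - 1) * 2 + 1  # 마지막 줄 길이
--         graph = [['-'] * l for _ in range(len(grid))]
--
--         #반시계방향이면 '-'를 오른쪽에 채우기
--         for i in range(len(grid)):
--             for j in range(len(grid[i])):
--                 graph[i][j] = grid[i][j]
--
--         temp = rotateReverse(graph)
--         answer.append(temp[0][-1])
--
--         for i in range(1, len(temp),2):
--             line = ''
--             for j in range(len(temp[0])):
--
--                 if temp[i][j] != '-':
--                     line+=temp[i][j]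
--
--                 if temp[i+1][j] != '-':
--                     line+=temp[i+1][j]
--
--             answer.append(line)
--
--     return answer
-- ===== SOURCE B (Python) =====
-- def solution(grid, clockwise):
--     # Compute each diagonal output line directly from the triangular grid with a
--     # cell-index formula, instead of building the padded picture and rotating it.
--     n = len(grid)
--     l = 2 * (n - 1) + 1  # width of the padded picture
--
--     if clockwise:
--         # right-aligned picture: column c of row r holds grid[r][c - (l - len(grid[r]))]
--         def cell(r, c):
--             off = l - len(grid[r])
--             return grid[r][c - off] if off <= c else '-'
--
--         def mkline(m):
--             line = ''
--             for r in range(n - 1, -1, -1):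
--                 for c in (2 * m, 2 * m - 1):
--                     v = cell(r, c)
--                     if v != '-':
--                         line += v
--             return line
--
--         return [cell(n - 1, 0)] + [mkline(m) for m in range(1, n)]
--     else:
--         # left-aligned picture
--         def cell(r, c):
--             return grid[r][c] if c < len(grid[r]) else '-'
--
--         def mkline(m):
--             line = ''
--             for r in range(n):
--                 for c in (l - 2 * m, l - 2 * m - 1):
--                     v = cell(r, c)
--                     if v != '-':
--                         line += v
--             return line
--
--         return [cell(n - 1, l - 1)] + [mkline(m) for m in range(1, n)]
-- ===== Notes on version B (the rewrite author's own statement) =====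
-- stated objective: alternative
-- what changed: B drops A's padded '-' matrix and both 90-degree rotation helpers entirely and emits each diagonal output line directly from the triangular grid, mapping every output position to its source cell with an index formula.
-- outside the precondition, e.g. on solution([['a', 'b', 'c', 'd'], ['x', 'y']], True): A returns ['-', 'yxdc'], B returns ['-', 'yxdc']; on solution([['a', 'b', 'c', 'd'], ['x', 'y']], False): A raises IndexError, B returns ['-', 'bayx']; on solution([], True): A raises IndexError, B raises IndexError
import Mathlib
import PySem

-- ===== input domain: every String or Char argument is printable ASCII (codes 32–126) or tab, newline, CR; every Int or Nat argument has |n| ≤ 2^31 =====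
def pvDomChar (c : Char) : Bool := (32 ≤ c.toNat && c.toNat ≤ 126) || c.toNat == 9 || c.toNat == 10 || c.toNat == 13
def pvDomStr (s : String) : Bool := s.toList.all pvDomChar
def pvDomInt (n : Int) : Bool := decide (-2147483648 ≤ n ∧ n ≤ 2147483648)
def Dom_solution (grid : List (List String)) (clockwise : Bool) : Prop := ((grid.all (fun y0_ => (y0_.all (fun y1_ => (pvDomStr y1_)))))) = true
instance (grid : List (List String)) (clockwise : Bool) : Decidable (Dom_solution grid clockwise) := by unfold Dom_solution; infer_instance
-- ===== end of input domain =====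

-- B computes each diagonal line directly from the triangular grid by a cell-index formula,
-- skipping A's padded matrix and both rotation helpers: a different decomposition, not claimed faster.

-- ===== PORT A =====
-- helpers for Python 2-D list indexing/assignment m[i][j]; on every input admitted by
-- Pre_solution all indices that A actually uses are in range, so the getD defaults are never read.
def pvGet2 (m : List (List String)) (i j : Nat) : String :=
  (m.getD i []).getD j ""

def pvSet2 (m : List (List String)) (i j : Nat) (v : String) : List (List String) :=
  m.set i ((m.getD i []).set j v)

-- Python's tmp = [[0]*len(g) for _ in range(len(g[0]))] holds int 0 placeholders; every entry is
-- overwritten by the loops before being read, so the placeholder "0" stands in for the int 0.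
def rotateClock (curgraph : List (List String)) : List (List String) :=
  let n := curgraph.length
  let m := (curgraph.headD []).length
  (List.range n).foldl (fun tmp i =>
    (List.range m).foldl (fun tmp j =>
      pvSet2 tmp j i (pvGet2 curgraph (n - i - 1) j)) tmp)
    (List.replicate m (List.replicate n "0"))

def rotateReverse (curgraph : List (List String)) : List (List String) :=
  let n := curgraph.length
  let m := (curgraph.headD []).length
  (List.range n).foldl (fun tmp i =>
    (List.range m).foldl (fun tmp j =>
      pvSet2 tmp j i (pvGet2 curgraph i (m - j - 1))) tmp)
    (List.replicate m (List.replicate n "0"))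

-- the Int i produced by range(1, len(temp), 2) is ≥ 1, so i.toNat is exact
def solution (grid : List (List String)) (clockwise : Bool) : List String :=
  if clockwise then
    let l := (grid.length - 1) * 2 + 1
    let graph0 := List.replicate grid.length (List.replicate l "-")
    let graph := (List.range grid.length).foldl (fun gph i =>
      (List.range (grid.getD i []).length).foldl (fun gph j =>
        pvSet2 gph i (l - (grid.getD i []).length + j) (pvGet2 grid i j)) gph) graph0
    let temp := rotateClock graph
    let answer := [pvGet2 temp 0 0]
    (PySem.List.pyRange 1 temp.length 2).foldl (fun ans i =>
      ans ++ [(List.range (temp.headD []).length).foldl (fun line j =>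
        let line := if pvGet2 temp (i.toNat + 1) j ≠ "-" then line ++ pvGet2 temp (i.toNat + 1) j else line
        if pvGet2 temp i.toNat j ≠ "-" then line ++ pvGet2 temp i.toNat j else line) ""]) answer
  else
    let l := (grid.length - 1) * 2 + 1
    let graph0 := List.replicate grid.length (List.replicate l "-")
    let graph := (List.range grid.length).foldl (fun gph i =>
      (List.range (grid.getD i []).length).foldl (fun gph j =>
        pvSet2 gph i j (pvGet2 grid i j)) gph) graph0
    let temp := rotateReverse graph
    let answer := [(PySem.List.pyGet? (temp.headD []) (-1)).getD ""]  -- temp[0][-1]; in range on Pre_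
    (PySem.List.pyRange 1 temp.length 2).foldl (fun ans i =>
      ans ++ [(List.range (temp.headD []).length).foldl (fun line j =>
        let line := if pvGet2 temp i.toNat j ≠ "-" then line ++ pvGet2 temp i.toNat j else line
        if pvGet2 temp (i.toNat + 1) j ≠ "-" then line ++ pvGet2 temp (i.toNat + 1) j else line) ""]) answer

-- ===== PORT B =====
def solution_alt (grid : List (List String)) (clockwise : Bool) : List String :=
  let n := grid.length
  let l := 2 * (n - 1) + 1
  if clockwise then
    -- right-aligned picture: column c of row r holds grid[r][c - (l - len(grid[r]))]
    let cell : Nat → Nat → String := fun r c =>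
      let row := grid.getD r []
      let off := l - row.length
      if off ≤ c then row.getD (c - off) "-" else "-"
    cell (n - 1) 0 :: (List.range' 1 (n - 1)).map (fun m =>
      ((List.range n).reverse).foldl (fun line r =>
        [2 * m, 2 * m - 1].foldl (fun line c =>
          let v := cell r c
          if v ≠ "-" then line ++ v else line) line) "")
  else
    -- left-aligned picture
    let cell : Nat → Nat → String := fun r c =>
      let row := grid.getD r []
      if c < row.length then row.getD c "-" else "-"
    cell (n - 1) (l - 1) :: (List.range' 1 (n - 1)).map (fun m =>
      (List.range n).foldl (fun line r =>
        [l - 2 * m, l - 2 * m - 1].foldl (fun line c =>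
          let v := cell r c
          if v ≠ "-" then line ++ v else line) line) "")

-- ===== PRECONDITION & SPEC =====
-- Pre_ restricts to the natural domain of the task: a nonempty (triangular) grid whose rows fit
-- inside the padded width 2*len(grid)-1.  Outside it A raises IndexError (empty grid; any longer
-- row counter-clockwise) or, clockwise, silently relies on Python negative-index wraparound when
-- writing the padding — an accident of A's implementation, not behaviour worth specifying.
def Pre_solution (grid : List (List String)) (clockwise : Bool) : Prop :=
  grid ≠ [] ∧ ∀ row ∈ grid, row.length ≤ 2 * (grid.length - 1) + 1
instance (grid : List (List String)) (clockwise : Bool) : Decidable (Pre_solution grid clockwise) := by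
  unfold Pre_solution; infer_instance

def pvWitness_solution : List (List String) × Bool := ([["a"], ["b", "c"]], true)

def Spec_solution (grid : List (List String)) (clockwise : Bool) (out : List String) : Prop := out = solution_alt grid clockwise
instance (grid : List (List String)) (clockwise : Bool) (out : List String) : Decidable (Spec_solution grid clockwise out) := by unfold Spec_solution; infer_instance

-- ===== CLAIM (what is proved, stated in full; the proofs are below) =====
def Claim_equal_solution : Prop := ∀ (grid : List (List String)) (clockwise : Bool), Dom_solution grid clockwise → Pre_solution grid clockwise → Spec_solution grid clockwise (solution grid clockwise)

-- ===== LEMMAS AND PROOFS =====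

-- generic bookkeeping about range-maps ----------------------------------------------------------
theorem pv_set_map_range {α : Type} (f : Nat → α) (n p : Nat) (v : α) :
    ((List.range n).map f).set p v = (List.range n).map (fun c => if c = p then v else f c) := by
  apply List.ext_getElem
  · simp
  · intro i h1 h2
    simp only [List.getElem_set, List.getElem_map, List.getElem_range]
    by_cases h : p = i
    · subst h; simp
    · rw [if_neg h, if_neg (fun hh => h hh.symm)]

theorem pv_map_getD_range_self (m : List (List String)) :
    (List.range m.length).map (fun j => m.getD j []) = m := by
  apply List.ext_getElem
  · simp
  · intro i h1 h2
    simp [List.getD_eq_getElem?_getD, List.getElem?_eq_getElem h2]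

theorem pv_reverse_range (n : Nat) :
    (List.range n).reverse = (List.range n).map (fun j => n - 1 - j) := by
  apply List.ext_getElem
  · simp
  · intro i h1 h2
    simp only [List.length_reverse, List.length_range] at h1
    rw [List.getElem_reverse]
    simp only [List.getElem_map, List.getElem_range, List.length_range]

theorem pv_foldl_append_singleton {α β : Type} (g : α → β) (xs : List α) (init : List β) :
    xs.foldl (fun ans i => ans ++ [g i]) init = init ++ xs.map g := by
  induction xs generalizing init with
  | nil => simp
  | cons x xs ih => simp [ih]

theorem pv_headD_map_range {α : Type} (f : Nat → α) (n : Nat) (d : α) (h : 0 < n) :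
    ((List.range n).map f).headD d = f 0 := by
  cases n with
  | zero => omega
  | succ k => rw [List.range_succ_eq_map]; rfl

theorem pv_getLast?_map_range {α : Type} (f : Nat → α) (n : Nat) (h : 0 < n) :
    ((List.range n).map f).getLast? = some (f (n - 1)) := by
  rw [List.getLast?_eq_getElem?]
  simp only [List.length_map, List.length_range]
  rw [List.getElem?_eq_getElem (by simp; omega)]
  simp

-- matrix fold = row fold -----------------------------------------------------------------------
theorem pv_foldl_set2_row (js : List Nat) (pos : Nat → Nat) (val : Nat → String)
    (m : List (List String)) (i : Nat) (hi : i < m.length) :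
    js.foldl (fun g j => pvSet2 g i (pos j) (val j)) m
      = m.set i (js.foldl (fun r j => r.set (pos j) (val j)) (m.getD i [])) := by
  induction js generalizing m with
  | nil =>
    simp only [List.foldl_nil]
    rw [List.getD_eq_getElem _ _ hi, List.set_getElem_self]
  | cons j js ih =>
    simp only [List.foldl_cons]
    rw [show pvSet2 m i (pos j) (val j) = m.set i ((m.getD i []).set (pos j) (val j)) from rfl]
    rw [ih _ (by simpa using hi)]
    have hset : (m.set i ((m.getD i []).set (pos j) (val j))).getD i []
        = (m.getD i []).set (pos j) (val j) := by
      rw [List.getD_eq_getElem _ _ (by simpa using hi)]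
      simp
    rw [hset, List.set_set]

-- filling one padded row ------------------------------------------------------------------------
theorem pv_row_fill (src : List String) (off l k : Nat) (hk : k ≤ src.length) (h : off + src.length ≤ l) :
    (List.range k).foldl (fun r j => r.set (off + j) (src.getD j "")) (List.replicate l "-")
      = (List.range l).map (fun c => if off ≤ c ∧ c < off + k then src.getD (c - off) "" else "-") := by
  induction k with
  | zero =>
    simp only [List.range_zero, List.foldl_nil]
    have : (fun (c : Nat) => if off ≤ c ∧ c < off + 0 then src.getD (c - off) "" else "-")
        = fun _ => "-" := by
      funext c; rw [if_neg (by omega)]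
    rw [this]
    apply List.ext_getElem <;> simp
  | succ k ih =>
    rw [List.range_succ, List.foldl_append, ih (by omega)]
    simp only [List.foldl_cons, List.foldl_nil]
    rw [pv_set_map_range]
    apply List.map_congr_left
    intro c hc
    have hc' := List.mem_range.mp hc
    by_cases h1 : c = off + k
    · subst h1
      rw [if_pos rfl, if_pos (by omega)]
      congr 1
      omega
    · rw [if_neg h1]
      by_cases h2 : off ≤ c ∧ c < off + k
      · rw [if_pos h2, if_pos (by omega)]
      · rw [if_neg h2, if_neg (by omega)]

-- building the padded picture row by row --------------------------------------------------------
theorem pv_fill_rows (n l : Nat) (upd : Nat → List String)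
    (g : List (List String) → Nat → List (List String))
    (hg : ∀ (m : List (List String)) (i : Nat), i < n → m.length = n →
        m.getD i [] = List.replicate l "-" → g m i = m.set i (upd i)) :
    ∀ k, k ≤ n →
    (List.range k).foldl g (List.replicate n (List.replicate l "-"))
      = (List.range n).map (fun r => if r < k then upd r else List.replicate l "-") := by
  intro k
  induction k with
  | zero =>
    intro _
    simp only [List.range_zero, List.foldl_nil]
    have : (fun (r : Nat) => if r < 0 then upd r else List.replicate l "-")
        = fun _ => List.replicate l "-" := by funext r; rw [if_neg (by omega)]
    rw [this]
    apply List.ext_getElem <;> simp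
  | succ k ih =>
    intro hk
    rw [List.range_succ, List.foldl_append, ih (by omega)]
    simp only [List.foldl_cons, List.foldl_nil]
    rw [hg _ k (by omega) (by simp) (by rw [PySem.List.getD_map_range _ _ _ _ (by omega), if_neg (by omega)])]
    rw [pv_set_map_range]
    apply List.map_congr_left
    intro r hr
    by_cases h1 : r = k
    · subst h1; rw [if_pos rfl, if_pos (by omega)]
    · rw [if_neg h1]
      by_cases h2 : r < k
      · rw [if_pos h2, if_pos (by omega)]
      · rw [if_neg h2, if_neg (by omega)]

-- one pass of a rotation: sets column i of rows 0..k-1 ------------------------------------------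
theorem pv_col_fill (i mlen : Nat) (v : Nat → String) (tmp : List (List String))
    (hl : tmp.length = mlen) :
    ∀ k, k ≤ mlen →
    (List.range k).foldl (fun t j => pvSet2 t j i (v j)) tmp
      = (List.range mlen).map (fun j => if j < k then (tmp.getD j []).set i (v j) else tmp.getD j []) := by
  intro k
  induction k with
  | zero =>
    intro _
    simp only [List.range_zero, List.foldl_nil]
    have : (fun (j : Nat) => if j < 0 then (tmp.getD j []).set i (v j) else tmp.getD j [])
        = fun j => tmp.getD j [] := by funext j; rw [if_neg (by omega)]
    rw [this, ← hl, pv_map_getD_range_self]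
  | succ k ih =>
    intro hk
    rw [List.range_succ, List.foldl_append, ih (by omega)]
    simp only [List.foldl_cons, List.foldl_nil]
    unfold pvSet2
    rw [PySem.List.getD_map_range _ _ _ _ (by omega), if_neg (by omega)]
    rw [pv_set_map_range]
    apply List.map_congr_left
    intro j hj
    by_cases h1 : j = k
    · subst h1; rw [if_pos rfl, if_pos (by omega)]
    · rw [if_neg h1]
      by_cases h2 : j < k
      · rw [if_pos h2, if_pos (by omega)]
      · rw [if_neg h2, if_neg (by omega)]

-- the whole rotation ----------------------------------------------------------------------------
theorem pv_rotate_fold (w : Nat → Nat → String) (n m : Nat) :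
    ∀ k, k ≤ n →
    (List.range k).foldl (fun tmp i =>
        (List.range m).foldl (fun t j => pvSet2 t j i (w i j)) tmp)
      (List.replicate m (List.replicate n "0"))
      = (List.range m).map (fun j => (List.range n).map (fun b => if b < k then w b j else "0")) := by
  intro k
  induction k with
  | zero =>
    intro _
    simp only [List.range_zero, List.foldl_nil]
    apply List.ext_getElem
    · simp
    · intro a h1 h2
      simp only [List.getElem_replicate, List.getElem_map, List.getElem_range]
      apply List.ext_getElem
      · simp
      · intro b h3 h4
        simp only [List.getElem_replicate, List.getElem_map, List.getElem_range]
        rw [if_neg (by omega)]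
  | succ k ih =>
    intro hk
    rw [List.range_succ, List.foldl_append, ih (by omega)]
    simp only [List.foldl_cons, List.foldl_nil]
    rw [pv_col_fill k m _ _ (by simp) m le_rfl]
    apply List.map_congr_left
    intro j hj
    rw [if_pos (List.mem_range.mp hj)]
    rw [PySem.List.getD_map_range _ _ _ _ (List.mem_range.mp hj)]
    rw [pv_set_map_range]
    apply List.map_congr_left
    intro b hb
    by_cases h1 : b = k
    · subst h1; rw [if_pos rfl, if_pos (by omega)]
    · rw [if_neg h1]
      by_cases h2 : b < k
      · rw [if_pos h2, if_pos (by omega)]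
      · rw [if_neg h2, if_neg (by omega)]

-- range(1, 2n-1, 2) -----------------------------------------------------------------------------
theorem pv_pyRange_odd (n : Nat) (h : 1 ≤ n) :
    PySem.List.pyRange 1 (((n - 1) * 2 + 1 : Nat) : Int) 2
      = (List.range (n - 1)).map (fun (k : Nat) => (1 : Int) + 2 * (k : Int)) := by
  rw [PySem.List.pyRange_of_pos _ _ (by norm_num)]
  have h2 : (if (1 : Int) < (((n - 1) * 2 + 1 : Nat) : Int)
      then ((((((n - 1) * 2 + 1 : Nat) : Int)) - 1 + 2 - 1) / 2).toNat else 0) = n - 1 := by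
    split_ifs with h1 <;> omega
  rw [h2]

-- the two branches ------------------------------------------------------------------------------

-- cell formulas used only by the proofs
def pvCellCW (grid : List (List String)) (l r c : Nat) : String :=
  if l - (grid.getD r []).length ≤ c then (grid.getD r []).getD (c - (l - (grid.getD r []).length)) "-" else "-"

def pvCellCCW (grid : List (List String)) (r c : Nat) : String :=
  if c < (grid.getD r []).length then (grid.getD r []).getD c "-" else "-"

theorem pv_cw (grid : List (List String)) (hne : grid ≠ [])
    (hrows : ∀ row ∈ grid, row.length ≤ 2 * (grid.length - 1) + 1) :
    solution grid true = solution_alt grid true := by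
  have hn1 : 0 < grid.length := by
    cases grid
    · exact absurd rfl hne
    · simp
  have hrow_le : ∀ i, (grid.getD i []).length ≤ (grid.length - 1) * 2 + 1 := by
    intro i
    by_cases hi : i < grid.length
    · have hm : grid.getD i [] ∈ grid := by
        rw [List.getD_eq_getElem _ _ hi]
        exact List.getElem_mem _
      have := hrows _ hm
      omega
    · rw [List.getD_eq_getElem?_getD, List.getElem?_eq_none (by omega)]
      simp
  have hgraph : (List.range grid.length).foldl (fun gph i =>
      (List.range (grid.getD i []).length).foldl (fun gph j =>
        pvSet2 gph i ((grid.length - 1) * 2 + 1 - (grid.getD i []).length + j) (pvGet2 grid i j)) gph)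
      (List.replicate grid.length (List.replicate ((grid.length - 1) * 2 + 1) "-"))
      = (List.range grid.length).map (fun r => (List.range ((grid.length - 1) * 2 + 1)).map
          (pvCellCW grid ((grid.length - 1) * 2 + 1) r)) := by
    rw [pv_fill_rows grid.length ((grid.length - 1) * 2 + 1)
        (fun r => (List.range ((grid.length - 1) * 2 + 1)).map (pvCellCW grid ((grid.length - 1) * 2 + 1) r)) _ ?hg grid.length le_rfl]
    · apply List.map_congr_left
      intro r hr
      rw [if_pos (List.mem_range.mp hr)]
    case hg =>
      intro m i hi hlen hrowi
      rw [pv_foldl_set2_row _ _ _ _ _ (by omega)]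
      congr 1
      rw [hrowi]
      simp only [pvGet2]
      rw [pv_row_fill (grid.getD i []) ((grid.length - 1) * 2 + 1 - (grid.getD i []).length)
          ((grid.length - 1) * 2 + 1) _ le_rfl (by have := hrow_le i; omega)]
      apply List.map_congr_left
      intro c hc
      have hc' := List.mem_range.mp hc
      have hle := hrow_le i
      simp only [pvCellCW]
      by_cases hcase : (grid.length - 1) * 2 + 1 - (grid.getD i []).length ≤ c
      · rw [if_pos ⟨hcase, by omega⟩, if_pos hcase]
        have hb2 : c - ((grid.length - 1) * 2 + 1 - (grid.getD i []).length) < (grid.getD i []).length := by omega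
        rw [List.getD_eq_getElem?_getD (l := grid.getD i []) (i := c - ((grid.length - 1) * 2 + 1 - (grid.getD i []).length)) (a := ""),
            List.getD_eq_getElem?_getD (l := grid.getD i []) (i := c - ((grid.length - 1) * 2 + 1 - (grid.getD i []).length)) (a := "-"),
            List.getElem?_eq_getElem hb2]
        rfl
      · rw [if_neg (by omega), if_neg hcase]
  have htemp : rotateClock ((List.range grid.length).map (fun r => (List.range ((grid.length - 1) * 2 + 1)).map
        (pvCellCW grid ((grid.length - 1) * 2 + 1) r)))
      = (List.range ((grid.length - 1) * 2 + 1)).map (fun j => (List.range grid.length).map (fun b =>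
          pvCellCW grid ((grid.length - 1) * 2 + 1) (grid.length - b - 1) j)) := by
    unfold rotateClock
    simp only [List.length_map, List.length_range]
    rw [pv_headD_map_range _ _ _ hn1]
    simp only [List.length_map, List.length_range]
    rw [pv_rotate_fold _ grid.length ((grid.length - 1) * 2 + 1) grid.length le_rfl]
    apply List.map_congr_left
    intro j hj
    apply List.map_congr_left
    intro b hb
    rw [if_pos (List.mem_range.mp hb)]
    simp only [pvGet2]
    rw [PySem.List.getD_map_range _ _ _ _ (by have := List.mem_range.mp hb; omega),
        PySem.List.getD_map_range _ _ _ _ (List.mem_range.mp hj)]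
  have hTlen : ((List.range ((grid.length - 1) * 2 + 1)).map (fun j => (List.range grid.length).map (fun b =>
      pvCellCW grid ((grid.length - 1) * 2 + 1) (grid.length - b - 1) j))).length = (grid.length - 1) * 2 + 1 := by simp
  have hheadlen : (((List.range ((grid.length - 1) * 2 + 1)).map (fun j => (List.range grid.length).map (fun b =>
      pvCellCW grid ((grid.length - 1) * 2 + 1) (grid.length - b - 1) j))).headD []).length = grid.length := by
    rw [pv_headD_map_range _ _ _ (by omega)]
    simp
  have hget : ∀ a b, a < (grid.length - 1) * 2 + 1 → b < grid.length →
      pvGet2 ((List.range ((grid.length - 1) * 2 + 1)).map (fun j => (List.range grid.length).map (fun b =>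
        pvCellCW grid ((grid.length - 1) * 2 + 1) (grid.length - b - 1) j))) a b
      = pvCellCW grid ((grid.length - 1) * 2 + 1) (grid.length - b - 1) a := by
    intro a b ha hb
    simp only [pvGet2]
    rw [PySem.List.getD_map_range _ _ _ _ ha, PySem.List.getD_map_range _ _ _ _ hb]
  simp only [solution, solution_alt, if_true]
  simp only [show 2 * (grid.length - 1) + 1 = (grid.length - 1) * 2 + 1 from by ring]
  simp only [hgraph]
  simp only [htemp]
  simp only [hTlen, hheadlen]
  rw [pv_pyRange_odd grid.length (by omega)]
  rw [pv_foldl_append_singleton]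
  simp only [List.map_map, List.singleton_append, List.range'_eq_map_range]
  simp only [pv_reverse_range, List.foldl_map]
  refine congrArg₂ List.cons ?_ ?_
  · rw [hget 0 0 (by omega) (by omega)]
    simp only [pvCellCW, Nat.sub_zero]
  · apply List.map_congr_left
    intro k hk
    have hk' := List.mem_range.mp hk
    simp only [Function.comp_apply]
    have et : ((1 : Int) + 2 * (k : Int)).toNat = 2 * k + 1 := by omega
    simp only [et]
    apply PySem.List.foldl_congr_mem
    intro acc j hj
    have hj' := List.mem_range.mp hj
    simp only [List.foldl_cons, List.foldl_nil]
    rw [hget (2 * k + 1 + 1) j (by omega) hj', hget (2 * k + 1) j (by omega) hj']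
    simp only [pvCellCW]
    have e1 : grid.length - 1 - j = grid.length - j - 1 := by omega
    have g1 : 2 * (1 + k) = 2 * k + 1 + 1 := by ring
    have g2 : 2 * k + 1 + 1 - 1 = 2 * k + 1 := by omega
    simp only [e1, g1, g2]

theorem pv_ccw (grid : List (List String)) (hne : grid ≠ [])
    (hrows : ∀ row ∈ grid, row.length ≤ 2 * (grid.length - 1) + 1) :
    solution grid false = solution_alt grid false := by
  have hn1 : 0 < grid.length := by
    cases grid
    · exact absurd rfl hne
    · simp
  have hrow_le : ∀ i, (grid.getD i []).length ≤ (grid.length - 1) * 2 + 1 := by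
    intro i
    by_cases hi : i < grid.length
    · have hm : grid.getD i [] ∈ grid := by
        rw [List.getD_eq_getElem _ _ hi]
        exact List.getElem_mem _
      have := hrows _ hm
      omega
    · rw [List.getD_eq_getElem?_getD, List.getElem?_eq_none (by omega)]
      simp
  have hgraph : (List.range grid.length).foldl (fun gph i =>
      (List.range (grid.getD i []).length).foldl (fun gph j =>
        pvSet2 gph i j (pvGet2 grid i j)) gph)
      (List.replicate grid.length (List.replicate ((grid.length - 1) * 2 + 1) "-"))
      = (List.range grid.length).map (fun r => (List.range ((grid.length - 1) * 2 + 1)).map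
          (pvCellCCW grid r)) := by
    rw [pv_fill_rows grid.length ((grid.length - 1) * 2 + 1)
        (fun r => (List.range ((grid.length - 1) * 2 + 1)).map (pvCellCCW grid r)) _ ?hg grid.length le_rfl]
    · apply List.map_congr_left
      intro r hr
      rw [if_pos (List.mem_range.mp hr)]
    case hg =>
      intro m i hi hlen hrowi
      rw [pv_foldl_set2_row _ _ _ _ _ (by omega)]
      congr 1
      rw [hrowi]
      simp only [pvGet2]
      have hzero : (fun (r : List String) (j : Nat) => r.set j ((grid.getD i []).getD j "")) =
          (fun r j => r.set (0 + j) ((grid.getD i []).getD j "")) := by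
        funext r j
        rw [Nat.zero_add]
      rw [hzero]
      rw [pv_row_fill (grid.getD i []) 0 ((grid.length - 1) * 2 + 1) _ le_rfl (by have := hrow_le i; omega)]
      apply List.map_congr_left
      intro c hc
      have hc' := List.mem_range.mp hc
      simp only [pvCellCCW, Nat.zero_add, Nat.sub_zero, Nat.zero_le, true_and]
      by_cases hcase : c < (grid.getD i []).length
      · rw [if_pos hcase, if_pos hcase]
        have hb2 : c < (grid.getD i []).length := hcase
        rw [List.getD_eq_getElem?_getD (l := grid.getD i []) (i := c) (a := ""),
            List.getD_eq_getElem?_getD (l := grid.getD i []) (i := c) (a := "-"),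
            List.getElem?_eq_getElem hb2]
        rfl
      · rw [if_neg hcase, if_neg hcase]
  have htemp : rotateReverse ((List.range grid.length).map (fun r => (List.range ((grid.length - 1) * 2 + 1)).map
        (pvCellCCW grid r)))
      = (List.range ((grid.length - 1) * 2 + 1)).map (fun j => (List.range grid.length).map (fun b =>
          pvCellCCW grid b ((grid.length - 1) * 2 + 1 - j - 1))) := by
    unfold rotateReverse
    simp only [List.length_map, List.length_range]
    rw [pv_headD_map_range _ _ _ hn1]
    simp only [List.length_map, List.length_range]
    rw [pv_rotate_fold _ grid.length ((grid.length - 1) * 2 + 1) grid.length le_rfl]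
    apply List.map_congr_left
    intro j hj
    apply List.map_congr_left
    intro b hb
    rw [if_pos (List.mem_range.mp hb)]
    simp only [pvGet2]
    rw [PySem.List.getD_map_range _ _ _ _ (List.mem_range.mp hb),
        PySem.List.getD_map_range _ _ _ _ (by have := List.mem_range.mp hj; omega)]
  have hTlen : ((List.range ((grid.length - 1) * 2 + 1)).map (fun j => (List.range grid.length).map (fun b =>
      pvCellCCW grid b ((grid.length - 1) * 2 + 1 - j - 1)))).length = (grid.length - 1) * 2 + 1 := by simp
  have hhead0 : ((List.range ((grid.length - 1) * 2 + 1)).map (fun j => (List.range grid.length).map (fun b =>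
      pvCellCCW grid b ((grid.length - 1) * 2 + 1 - j - 1)))).headD []
      = (List.range grid.length).map (fun b => pvCellCCW grid b ((grid.length - 1) * 2 + 1 - 0 - 1)) := by
    rw [pv_headD_map_range _ _ _ (by omega)]
  have hget : ∀ a b, a < (grid.length - 1) * 2 + 1 → b < grid.length →
      pvGet2 ((List.range ((grid.length - 1) * 2 + 1)).map (fun j => (List.range grid.length).map (fun b =>
        pvCellCCW grid b ((grid.length - 1) * 2 + 1 - j - 1)))) a b
      = pvCellCCW grid b ((grid.length - 1) * 2 + 1 - a - 1) := by
    intro a b ha hb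
    simp only [pvGet2]
    rw [PySem.List.getD_map_range _ _ _ _ ha, PySem.List.getD_map_range _ _ _ _ hb]
  simp only [solution, solution_alt, if_false, Bool.false_eq_true]
  simp only [show 2 * (grid.length - 1) + 1 = (grid.length - 1) * 2 + 1 from by ring]
  simp only [hgraph]
  simp only [htemp]
  simp only [hhead0, hTlen, List.length_map, List.length_range]
  rw [PySem.List.pyGet?_neg_one, pv_getLast?_map_range _ _ hn1]
  simp only [Option.getD_some]
  rw [pv_pyRange_odd grid.length (by omega)]
  rw [pv_foldl_append_singleton]
  simp only [List.map_map, List.singleton_append, List.range'_eq_map_range]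
  refine congrArg₂ List.cons ?_ ?_
  · simp only [pvCellCCW, Nat.sub_zero]
  · apply List.map_congr_left
    intro k hk
    have hk' := List.mem_range.mp hk
    simp only [Function.comp_apply]
    have et : ((1 : Int) + 2 * (k : Int)).toNat = 2 * k + 1 := by omega
    simp only [et]
    apply PySem.List.foldl_congr_mem
    intro acc j hj
    have hj' := List.mem_range.mp hj
    simp only [List.foldl_cons, List.foldl_nil]
    rw [hget (2 * k + 1) j (by omega) hj', hget (2 * k + 1 + 1) j (by omega) hj']
    simp only [pvCellCCW]
    have f1 : (grid.length - 1) * 2 + 1 - (2 * k + 1) - 1 = (grid.length - 1) * 2 + 1 - 2 * (1 + k) := by omega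
    have f2 : (grid.length - 1) * 2 + 1 - (2 * k + 1 + 1) - 1 = (grid.length - 1) * 2 + 1 - 2 * (1 + k) - 1 := by omega
    simp only [f1, f2]

-- ===== VERDICT (by name: the statement is the Claim_ definition above) =====
theorem solution_spec : Claim_equal_solution := by
  intro grid clockwise _dom hpre
  unfold Spec_solution
  cases clockwise
  · exact pv_ccw grid hpre.1 hpre.2
  · exact pv_cw grid hpre.1 hpre.2
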